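-- pv_equiv track=rewrite | github.com/LanceNorskog/deep_meter_2 | cmu/topk.py | short_sentences
-- ===== SOURCE A (Python) =====
-- def short_sentences(sentences, num_sylls):
--     out = {}
--     for i in range(1, num_sylls + 1):
--         for (k, v) in sentences.items():
--             if len(v) == i:
--                 out[k] = v
--         if len(out) > 4:
--             return out
--     return out
-- ===== SOURCE B (Python) =====
-- def short_sentences(sentences, num_sylls):
--     # histogram of syllable-list lengths
--     hist = {}
--     for v in sentences.values():
--         n = len(v)
--         hist[n] = hist.get(n, 0) + 1
--     # smallest cutoff length whose cumulative count exceeds 4 (else the last length tried)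
--     total = 0
--     cut = 0
--     for i in range(1, num_sylls + 1):
--         total += hist.get(i, 0)
--         if total > 4:
--             cut = i
--             break
--         cut = i
--     kept = [(k, v) for k, v in sentences.items() if 1 <= len(v) <= cut]
--     kept.sort(key=lambda kv: len(kv[1]))
--     return dict(kept)
-- ===== Notes on version B (the rewrite author's own statement) =====
-- stated objective: alternative
-- what changed: B replaces A's per-length rescans of the whole dict by a length histogram, an arithmetic scan of that histogram to find the cutoff length (same >4 early-exit rule), and a single filter plus stable sort by length that reproduces A's grouped insertion order.
import Mathlib
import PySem

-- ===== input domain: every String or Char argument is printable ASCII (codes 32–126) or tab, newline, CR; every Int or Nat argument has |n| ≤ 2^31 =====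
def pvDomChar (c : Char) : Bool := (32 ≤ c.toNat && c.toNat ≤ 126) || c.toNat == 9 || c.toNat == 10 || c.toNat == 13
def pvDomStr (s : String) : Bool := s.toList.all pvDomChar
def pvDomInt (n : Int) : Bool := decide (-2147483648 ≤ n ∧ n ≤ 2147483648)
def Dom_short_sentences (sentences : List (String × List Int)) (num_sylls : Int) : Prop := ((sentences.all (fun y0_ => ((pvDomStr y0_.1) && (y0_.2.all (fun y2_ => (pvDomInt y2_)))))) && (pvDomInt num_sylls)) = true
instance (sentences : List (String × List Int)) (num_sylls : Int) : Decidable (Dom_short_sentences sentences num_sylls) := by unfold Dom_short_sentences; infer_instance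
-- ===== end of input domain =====

-- B drops A's interleaved length-by-length rescans: it takes a length histogram, computes the
-- cutoff length arithmetically, and emits one stable sort of the single filtered pass (alternative decomposition).

-- ===== PORT A =====
-- the outer 'for i in range(1, num_sylls+1)' loop with its early 'return out'
def ssA_loop (sentences : List (String × List Int)) :
    List Int → PySem.Dict String (List Int) → PySem.Dict String (List Int)
  | [], out => out
  | i :: rest, out =>
      -- inner 'for (k, v) in sentences.items(): if len(v) == i: out[k] = v'
      let out' := sentences.foldl
        (fun o kv => if PySem.List.len kv.2 == i then o.insert kv.1 kv.2 else o) out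
      if 4 < out'.size then out' else ssA_loop sentences rest out'

def short_sentences (sentences : List (String × List Int)) (num_sylls : Int) : List (String × List Int) :=
  (ssA_loop sentences (PySem.List.pyRange 1 (num_sylls + 1) 1) PySem.Dict.empty).items

-- ===== PORT B =====
-- 'hist[n] = hist.get(n, 0) + 1' over all values
def ssB_hist (sentences : List (String × List Int)) : PySem.Dict Int Int :=
  sentences.foldl (fun d kv => d.modify (PySem.List.len kv.2) 0 (· + 1)) PySem.Dict.empty

-- 'total += hist.get(i, 0); if total > 4: cut = i; break; cut = i'
def ssB_cut (hist : PySem.Dict Int Int) : List Int → Int → Int → Int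
  | [], _, cut => cut
  | i :: rest, total, cut =>
      let total' := total + hist.getD i 0
      if 4 < total' then i else ssB_cut hist rest total' i

def short_sentences_alt (sentences : List (String × List Int)) (num_sylls : Int) : List (String × List Int) :=
  let hist := ssB_hist sentences
  let cut := ssB_cut hist (PySem.List.pyRange 1 (num_sylls + 1) 1) 0 0
  let kept := sentences.filter (fun kv => 1 ≤ PySem.List.len kv.2 && PySem.List.len kv.2 ≤ cut)
  let sortedKept := PySem.List.sorted kept (fun kv => PySem.List.len kv.2)
  (sortedKept.foldl (fun d kv => d.insert kv.1 kv.2) PySem.Dict.empty).items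

-- ===== PRECONDITION & SPEC =====
-- Pre_ excludes association lists with duplicate string keys: they do not represent any Python
-- dict (A's parameter is a dict, whose keys are necessarily distinct), so A is never run on them.
def Pre_short_sentences (sentences : List (String × List Int)) (num_sylls : Int) : Prop :=
  (sentences.map Prod.fst).Nodup
instance (sentences : List (String × List Int)) (num_sylls : Int) : Decidable (Pre_short_sentences sentences num_sylls) := by unfold Pre_short_sentences; infer_instance

def pvWitness_short_sentences : (List (String × List Int)) × Int := ([("a", [1]), ("bb", [2, 3])], 3)

def Spec_short_sentences (sentences : List (String × List Int)) (num_sylls : Int) (out : List (String × List Int)) : Prop := out = short_sentences_alt sentences num_sylls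
instance (sentences : List (String × List Int)) (num_sylls : Int) (out : List (String × List Int)) : Decidable (Spec_short_sentences sentences num_sylls out) := by unfold Spec_short_sentences; infer_instance

-- ===== CLAIM =====
def Claim_equal_short_sentences : Prop := ∀ (sentences : List (String × List Int)) (num_sylls : Int), Dom_short_sentences sentences num_sylls → Pre_short_sentences sentences num_sylls → Spec_short_sentences sentences num_sylls (short_sentences sentences num_sylls)

-- ===== LEMMAS AND PROOFS =====

-- the length key both programs group by
def pvKey (kv : String × List Int) : Int := PySem.List.len kv.2

-- the sentences of length exactly i, in input order
def pvGrp (xs : List (String × List Int)) (i : Int) : List (String × List Int) :=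
  xs.filter (fun y => pvKey y == i)

-- the grouped list: lengths 1 .. t-1 in increasing order, input order within a length
def pvG (xs : List (String × List Int)) (t : Int) : List (String × List Int) :=
  (PySem.List.pyRange 1 t 1).flatMap (pvGrp xs)

-- A's algorithm at the list level: append whole groups, stop once more than 4 collected
def pvSpecLoop (xs : List (String × List Int)) : List Int → List (String × List Int) → List (String × List Int)
  | [], acc => acc
  | i :: rest, acc =>
      let acc' := acc ++ pvGrp xs i
      if 4 < acc'.length then acc' else pvSpecLoop xs rest acc'

theorem insertBy_append_left {α : Type} (before : α → α → Bool) (x : α) (g t : List α)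
    (h : ∀ y ∈ g, before x y = false) :
    PySem.List.insertBy before x (g ++ t) = g ++ PySem.List.insertBy before x t := by
  induction g with
  | nil => rfl
  | cons y ys ih =>
      simp only [List.cons_append, PySem.List.insertBy, h y (by simp)]
      exact congrArg (y :: ·) (ih (fun z hz => h z (by simp [hz])))

theorem insertBy_all_before {α : Type} (before : α → α → Bool) (x : α) (t : List α)
    (h : ∀ z ∈ t, before x z = true) :
    PySem.List.insertBy before x t = x :: t := by
  cases t with
  | nil => rfl
  | cons z zs => simp [PySem.List.insertBy, h z (by simp)]

theorem mem_pvGrp_key {xs : List (String × List Int)} {i : Int} {y : String × List Int}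
    (h : y ∈ pvGrp xs i) : pvKey y = i ∧ y ∈ xs := by
  unfold pvGrp at h
  have := List.of_mem_filter h
  exact ⟨by simpa using this, List.mem_of_mem_filter h⟩

theorem insert_into_groups (xs : List (String × List Int)) (x : String × List Int) :
    ∀ (R : List Int), R.Pairwise (· < ·) → pvKey x ∈ R →
    PySem.List.insertBy (fun a b => decide (pvKey a < pvKey b)) x (R.flatMap (pvGrp xs))
      = R.flatMap (pvGrp (xs ++ [x])) := by
  intro R
  induction R with
  | nil => intro _ hx; simp at hx
  | cons i R' ih =>
      intro hp hx
      have hp' : R'.Pairwise (· < ·) := hp.of_cons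
      have hlt : ∀ j ∈ R', i < j := fun j hj => List.rel_of_pairwise_cons hp hj
      simp only [List.flatMap_cons]
      by_cases hxi : pvKey x = i
      · -- x joins the first group: pass through it, then sit in front of all later groups
        rw [insertBy_append_left _ _ _ _ (by
          intro y hy
          have := (mem_pvGrp_key hy).1
          simp [this, hxi])]
        rw [insertBy_all_before _ _ _ (by
          intro z hz
          rcases List.mem_flatMap.1 hz with ⟨j, hj, hzj⟩
          have := (mem_pvGrp_key hzj).1
          simp [this, hxi]
          exact hlt j hj)]
        have h1 : pvGrp (xs ++ [x]) i = pvGrp xs i ++ [x] := by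
          unfold pvGrp; simp [List.filter_append, hxi]
        have h2 : R'.flatMap (pvGrp (xs ++ [x])) = R'.flatMap (pvGrp xs) := by
          refine List.flatMap_congr ?_
          intro j hj
          unfold pvGrp
          simp [List.filter_append]
          intro h; have := hlt j hj; omega
        rw [h1, h2]; simp
      · -- x belongs to a later group
        have hx' : pvKey x ∈ R' := by
          cases hx with
          | head => exact absurd rfl hxi
          | tail _ h => exact h
        rw [insertBy_append_left _ _ _ _ (by
          intro y hy
          have := (mem_pvGrp_key hy).1
          have : ¬ pvKey x < pvKey y := by
            rw [this]; exact not_lt.2 (le_of_lt (hlt _ hx'))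
          simpa using this)]
        have h1 : pvGrp (xs ++ [x]) i = pvGrp xs i := by
          unfold pvGrp; simp [List.filter_append, hxi]
        rw [h1, ih hp' hx']

theorem grouped (R : List Int) (hR : R.Pairwise (· < ·)) :
    ∀ xs : List (String × List Int),
    PySem.List.sorted (xs.filter (fun y => decide (pvKey y ∈ R))) pvKey
      = R.flatMap (pvGrp xs) := by
  intro xs
  rw [PySem.List.sorted_eq_foldl_insertBy]
  induction xs using List.reverseRecOn with
  | nil =>
      have : R.flatMap (pvGrp ([] : List (String × List Int))) = [] := by
        simp [pvGrp]
      simp [this]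
  | append_singleton xs x ih =>
      by_cases hx : pvKey x ∈ R
      · have hpx : (decide (pvKey x ∈ R)) = true := by simp [hx]
        rw [List.filter_append]
        simp only [List.filter_cons, List.filter_nil, hpx, if_pos]
        rw [List.foldl_append]
        simp only [List.foldl_cons, List.foldl_nil]
        rw [ih]
        exact insert_into_groups xs x R hR hx
      · have hpx : (decide (pvKey x ∈ R)) = false := by simp [hx]
        rw [List.filter_append]
        simp only [List.filter_cons, List.filter_nil, hpx, Bool.false_eq_true, if_false]
        rw [List.append_nil, ih]
        refine List.flatMap_congr ?_
        intro j hj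
        unfold pvGrp
        simp [List.filter_append]
        intro h; exact absurd (h ▸ hj) hx

-- the histogram really counts the group sizes
theorem hist_getD (xs : List (String × List Int)) (i : Int) :
    (ssB_hist xs).getD i 0 = ((pvGrp xs i).length : Int) := by
  have h := PySem.Dict.getD_foldl_modify_add_one (xs.map pvKey) PySem.Dict.empty i
  rw [List.foldl_map] at h
  have h2 : (ssB_hist xs).getD i 0
      = PySem.Dict.empty.getD i (0 : Int) + ((xs.map pvKey).count i : Int) := h
  rw [PySem.Dict.getD_empty, List.count_eq_countP, List.countP_map] at h2
  rw [h2]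
  unfold pvGrp
  rw [← List.countP_eq_length_filter]
  simp [Function.comp_def, pvKey]

-- inserting pairwise-fresh, mutually distinct keys just appends to the item list
theorem dict_items_foldl_insert :
    ∀ (L : List (String × List Int)) (d : PySem.Dict String (List Int)),
    (∀ kv ∈ L, d.contains kv.1 = false) → (L.map Prod.fst).Nodup →
    (L.foldl (fun d kv => d.insert kv.1 kv.2) d).items = d.items ++ L := by
  intro L
  induction L with
  | nil => intro d _ _; simp
  | cons kv rest ih =>
      intro d hfresh hnd
      rw [List.map_cons] at hnd
      have hd : d.contains kv.1 = false := hfresh kv (by simp)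
      have hins : (d.insert kv.1 kv.2).items = d.items ++ [kv] := by
        simp [PySem.Dict.insert, hd]
      simp only [List.foldl_cons]
      rw [ih (d.insert kv.1 kv.2) ?_ (List.nodup_cons.1 hnd).2]
      · rw [hins]; simp
      · intro kv' hkv'
        have hne : kv'.1 ≠ kv.1 := by
          intro h
          exact (List.nodup_cons.1 hnd).1 (h ▸ List.mem_map_of_mem hkv')
        have hd' : d.contains kv'.1 = false := hfresh kv' (List.mem_cons_of_mem _ hkv')
        simp only [PySem.Dict.contains] at hd' ⊢
        rw [hins]
        simp only [List.any_append, List.any_cons, List.any_nil, hd', Bool.false_or, Bool.or_false]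
        exact beq_eq_false_iff_ne.2 (fun h => hne h.symm)

theorem pvGrp_keys_nodup {xs : List (String × List Int)} (h : (xs.map Prod.fst).Nodup) (i : Int) :
    ((pvGrp xs i).map Prod.fst).Nodup :=
  h.sublist (List.filter_sublist.map Prod.fst)

-- A's dict loop, read through its item list, is pvSpecLoop
theorem A_items (xs : List (String × List Int)) (hxs : (xs.map Prod.fst).Nodup) :
    ∀ (r : List Int) (d : PySem.Dict String (List Int)), r.Nodup →
    (∀ i ∈ r, ∀ kv ∈ pvGrp xs i, d.contains kv.1 = false) →
    (ssA_loop xs r d).items = pvSpecLoop xs r d.items := by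
  intro r
  induction r with
  | nil => intro d _ _; rfl
  | cons i rest ih =>
      intro d hnd hfresh
      have hinner : xs.foldl (fun o kv => if PySem.List.len kv.2 == i then o.insert kv.1 kv.2 else o) d
          = (pvGrp xs i).foldl (fun o kv => o.insert kv.1 kv.2) d := by
        rw [pvGrp]; rw [List.foldl_filter]; rfl
      have hitems : (xs.foldl (fun o kv => if PySem.List.len kv.2 == i then o.insert kv.1 kv.2 else o) d).items
          = d.items ++ pvGrp xs i := by
        rw [hinner]
        exact dict_items_foldl_insert _ d (hfresh i (by simp)) (pvGrp_keys_nodup hxs i)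
      have hfresh' : ∀ j ∈ rest, ∀ kv ∈ pvGrp xs j,
          (xs.foldl (fun o kv => if PySem.List.len kv.2 == i then o.insert kv.1 kv.2 else o) d).contains kv.1 = false := by
        intro j hj kv hkv
        have hj_ne : j ≠ i := fun h => (List.nodup_cons.1 hnd).1 (h ▸ hj)
        have hkey : pvKey kv = j := (mem_pvGrp_key hkv).1
        have hmem : kv ∈ xs := (mem_pvGrp_key hkv).2
        have hfreshd : d.contains kv.1 = false := hfresh j (List.mem_cons_of_mem _ hj) kv hkv
        simp only [PySem.Dict.contains] at hfreshd ⊢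
        rw [hitems]
        simp only [List.any_append, hfreshd, Bool.false_or]
        rw [List.any_eq_false]
        intro kv' hkv'
        have hkey' : pvKey kv' = i := (mem_pvGrp_key hkv').1
        have hmem' : kv' ∈ xs := (mem_pvGrp_key hkv').2
        intro hbeq
        have heq : kv' = kv := List.inj_on_of_nodup_map hxs hmem' hmem (beq_iff_eq.1 hbeq)
        exact hj_ne (by rw [← hkey, ← heq, hkey'])
      have hrec := fun hAll => ih (xs.foldl (fun o kv => if PySem.List.len kv.2 == i then o.insert kv.1 kv.2 else o) d)
        (List.nodup_cons.1 hnd).2 hAll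
      simp only [ssA_loop, pvSpecLoop]
      simp only [apply_ite PySem.Dict.items, PySem.Dict.size]
      rw [hrec hfresh']
      simp only [hitems]

-- A's list-level loop and B's cutoff loop walk the lengths in lockstep
theorem loops (xs : List (String × List Int)) (b : Int) :
    ∀ (n : Nat) (j : Int), 1 ≤ j → (b - j).toNat ≤ n →
    pvSpecLoop xs (PySem.List.pyRange j b 1) (pvG xs j)
      = pvG xs (ssB_cut (ssB_hist xs) (PySem.List.pyRange j b 1) ((pvG xs j).length : Int) (j - 1) + 1) := by
  intro n
  induction n with
  | zero =>
      intro j hj hn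
      have hb : b ≤ j := by omega
      rw [PySem.List.pyRange_one_eq_nil hb]
      have hjj : j - 1 + 1 = j := by omega
      simp only [pvSpecLoop, ssB_cut, hjj]
  | succ n ih =>
      intro j hj hn
      by_cases hb : b ≤ j
      · rw [PySem.List.pyRange_one_eq_nil hb]
        have hjj : j - 1 + 1 = j := by omega
        simp only [pvSpecLoop, ssB_cut, hjj]
      · push_neg at hb
        rw [PySem.List.pyRange_one_cons hb]
        have hacc : pvG xs j ++ pvGrp xs j = pvG xs (j + 1) := by
          unfold pvG
          rw [PySem.List.pyRange_one_succ_right hj, List.flatMap_append]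
          simp
        have htot : ((pvG xs j).length : Int) + (ssB_hist xs).getD j 0 = ((pvG xs (j + 1)).length : Int) := by
          rw [hist_getD, ← hacc]
          simp
        simp only [pvSpecLoop, ssB_cut, hacc, htot]
        by_cases hc : 4 < (pvG xs (j + 1)).length
        · have hc' : (4 : Int) < ((pvG xs (j + 1)).length : Int) := by exact_mod_cast hc
          rw [if_pos hc, if_pos hc']
        · have hc' : ¬ (4 : Int) < ((pvG xs (j + 1)).length : Int) := by exact_mod_cast hc
          rw [if_neg hc, if_neg hc']
          have := ih (j + 1) (by omega) (by omega)
          simpa using this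

-- ===== VERDICT =====
theorem short_sentences_spec : Claim_equal_short_sentences := by
  intro xs ns _ hpre
  unfold Spec_short_sentences short_sentences short_sentences_alt
  -- A's side: items of the dict loop = pvSpecLoop from the empty accumulator
  have hR : (PySem.List.pyRange 1 (ns + 1) 1).Nodup :=
    (PySem.List.pairwise_lt_pyRange_one 1 (ns + 1)).imp (fun h => ne_of_lt h)
  have hA : (ssA_loop xs (PySem.List.pyRange 1 (ns + 1) 1) PySem.Dict.empty).items
      = pvSpecLoop xs (PySem.List.pyRange 1 (ns + 1) 1) [] := by
    have := A_items xs hpre (PySem.List.pyRange 1 (ns + 1) 1) PySem.Dict.empty hR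
      (by intro i _ kv _; simp [PySem.Dict.contains, PySem.Dict.empty])
    simpa [PySem.Dict.empty] using this
  have hG1 : pvG xs 1 = [] := by
    unfold pvG
    rw [PySem.List.pyRange_one_eq_nil (by omega)]
    rfl
  set cut := ssB_cut (ssB_hist xs) (PySem.List.pyRange 1 (ns + 1) 1) 0 0
  have hAB : pvSpecLoop xs (PySem.List.pyRange 1 (ns + 1) 1) [] = pvG xs (cut + 1) := by
    have := loops xs (ns + 1) (ns + 1 - 1).toNat 1 (by omega) (by omega)
    rw [hG1] at this
    simpa using this
  -- B's side: the sorted filtered list is the grouped list, and its dict just relists it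
  have hfil : xs.filter (fun kv => 1 ≤ PySem.List.len kv.2 && PySem.List.len kv.2 ≤ cut)
      = xs.filter (fun y => decide (pvKey y ∈ PySem.List.pyRange 1 (cut + 1) 1)) := by
    refine List.filter_congr ?_
    intro y _
    rw [Bool.eq_iff_iff]
    simp only [Bool.and_eq_true, decide_eq_true_eq, PySem.List.mem_pyRange_one, pvKey,
      PySem.List.len_eq]
    omega
  have hsorted : PySem.List.sorted (xs.filter (fun kv => 1 ≤ PySem.List.len kv.2 && PySem.List.len kv.2 ≤ cut)) (fun kv => PySem.List.len kv.2)
      = pvG xs (cut + 1) := by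
    rw [hfil]
    exact grouped (PySem.List.pyRange 1 (cut + 1) 1) (PySem.List.pairwise_lt_pyRange_one 1 (cut + 1)) xs
  have hkeys : ((PySem.List.sorted (xs.filter (fun kv => 1 ≤ PySem.List.len kv.2 && PySem.List.len kv.2 ≤ cut)) (fun kv => PySem.List.len kv.2)).map Prod.fst).Nodup := by
    have hperm := PySem.List.sorted_perm (xs.filter (fun kv => 1 ≤ PySem.List.len kv.2 && PySem.List.len kv.2 ≤ cut)) (fun kv => PySem.List.len kv.2) false
    have hsub : ((xs.filter (fun kv => 1 ≤ PySem.List.len kv.2 && PySem.List.len kv.2 ≤ cut)).map Prod.fst).Nodup :=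
      hpre.sublist (List.filter_sublist.map Prod.fst)
    exact (hperm.map Prod.fst).nodup_iff.2 hsub
  have hB : ((PySem.List.sorted (xs.filter (fun kv => 1 ≤ PySem.List.len kv.2 && PySem.List.len kv.2 ≤ cut)) (fun kv => PySem.List.len kv.2)).foldl (fun d kv => d.insert kv.1 kv.2) PySem.Dict.empty).items
      = PySem.List.sorted (xs.filter (fun kv => 1 ≤ PySem.List.len kv.2 && PySem.List.len kv.2 ≤ cut)) (fun kv => PySem.List.len kv.2) := by
    have := dict_items_foldl_insert _ PySem.Dict.empty
      (by intro kv _; simp [PySem.Dict.contains, PySem.Dict.empty]) hkeys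
    simpa [PySem.Dict.empty] using this
  rw [hA, hAB, hB, hsorted]
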